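-- pv_equiv track=rewrite | github.com/Secrettestbot/Super-board-game-game | games/cathedral.py | _get_rotated_shape
-- ===== SOURCE A (Python) =====
-- def _get_rotated_shape(base_cells, rotation):
--     """Rotate a piece shape by the given degrees (0, 90, 180, 270)."""
--     cells = base_cells[:]
--
--     rotations = (rotation % 360) // 90
--     for _ in range(rotations):
--         # Rotate 90 degrees clockwise: (r, c) -> (c, -r)
--         cells = [(c, -r) for r, c in cells]
--
--     # Normalize: shift so minimum row and col are both 0
--     min_r = min(r for r, c in cells)
--     min_c = min(c for r, c in cells)
--     cells = [(r - min_r, c - min_c) for r, c in cells]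
--
--     return cells
-- ===== SOURCE B (Python) =====
-- def _get_rotated_shape(base_cells, rotation):
--     """Rotate a piece shape by the given degrees (0, 90, 180, 270)."""
--     k = (rotation % 360) // 90
--     lo_r = min(r for r, c in base_cells)
--     hi_r = max(r for r, c in base_cells)
--     lo_c = min(c for r, c in base_cells)
--     hi_c = max(c for r, c in base_cells)
--     if k == 0:
--         return [(r - lo_r, c - lo_c) for r, c in base_cells]
--     if k == 1:
--         return [(c - lo_c, hi_r - r) for r, c in base_cells]
--     if k == 2:
--         return [(hi_r - r, hi_c - c) for r, c in base_cells]
--     return [(hi_c - c, r - lo_r) for r, c in base_cells]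
-- ===== Notes on version B (the rewrite author's own statement) =====
-- stated objective: alternative
-- what changed: Eliminates both the repeated 90-degree rotation loop and the intermediate rotated list: B computes min/max of the base coordinates once and emits each rotated-and-normalized cell directly with one closed-form transform chosen from k=(rotation%360)//90.
import Mathlib
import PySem

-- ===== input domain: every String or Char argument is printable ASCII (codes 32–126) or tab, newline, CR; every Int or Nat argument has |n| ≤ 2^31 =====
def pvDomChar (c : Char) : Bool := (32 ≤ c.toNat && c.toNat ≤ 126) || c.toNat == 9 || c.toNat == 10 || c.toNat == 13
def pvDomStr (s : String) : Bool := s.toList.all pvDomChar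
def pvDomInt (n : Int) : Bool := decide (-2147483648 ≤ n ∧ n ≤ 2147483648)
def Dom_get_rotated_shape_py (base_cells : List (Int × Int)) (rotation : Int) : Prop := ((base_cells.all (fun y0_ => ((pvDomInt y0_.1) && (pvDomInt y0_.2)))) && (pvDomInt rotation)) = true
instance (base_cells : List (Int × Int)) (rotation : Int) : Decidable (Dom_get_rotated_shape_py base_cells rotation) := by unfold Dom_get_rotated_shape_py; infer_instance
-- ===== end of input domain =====

-- B removes A's repeated-rotation loop and intermediate rotated list: it takes min/max of the
-- base coordinates once and emits each rotated-and-normalized cell directly in one pass.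

-- ===== PORT A =====
def get_rotated_shape_py (base_cells : List (Int × Int)) (rotation : Int) : List (Int × Int) :=
  let cells := base_cells
  let rotations := PySem.Int.floordiv (PySem.Int.mod rotation 360) 90
  let cells := (PySem.List.pyRange 0 rotations 1).foldl
      (fun cs _ => cs.map (fun rc => (rc.2, -rc.1))) cells
  let min_r := (PySem.List.min? (cells.map (fun rc => rc.1)) (fun x => x)).getD 0
  let min_c := (PySem.List.min? (cells.map (fun rc => rc.2)) (fun x => x)).getD 0
  cells.map (fun rc => (rc.1 - min_r, rc.2 - min_c))

-- ===== PORT B =====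
def get_rotated_shape_py_alt (base_cells : List (Int × Int)) (rotation : Int) : List (Int × Int) :=
  let k := PySem.Int.floordiv (PySem.Int.mod rotation 360) 90
  let lo_r := (PySem.List.min? (base_cells.map (fun rc => rc.1)) (fun x => x)).getD 0
  let hi_r := (PySem.List.max? (base_cells.map (fun rc => rc.1)) (fun x => x)).getD 0
  let lo_c := (PySem.List.min? (base_cells.map (fun rc => rc.2)) (fun x => x)).getD 0
  let hi_c := (PySem.List.max? (base_cells.map (fun rc => rc.2)) (fun x => x)).getD 0
  if k = 0 then base_cells.map (fun rc => (rc.1 - lo_r, rc.2 - lo_c))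
  else if k = 1 then base_cells.map (fun rc => (rc.2 - lo_c, hi_r - rc.1))
  else if k = 2 then base_cells.map (fun rc => (hi_r - rc.1, hi_c - rc.2))
  else base_cells.map (fun rc => (hi_c - rc.2, rc.1 - lo_r))

-- ===== PRECONDITION & SPEC =====
-- Pre_ excludes the empty list, on which the Python A (and B) raise ValueError from min().
def Pre_get_rotated_shape_py (base_cells : List (Int × Int)) (_rotation : Int) : Prop := base_cells ≠ []
instance (base_cells : List (Int × Int)) (rotation : Int) : Decidable (Pre_get_rotated_shape_py base_cells rotation) := by unfold Pre_get_rotated_shape_py; infer_instance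
def pvWitness_get_rotated_shape_py : (List (Int × Int)) × Int := ([(0, 0), (1, 0), (1, 1)], 90)
def Spec_get_rotated_shape_py (base_cells : List (Int × Int)) (rotation : Int) (out : List (Int × Int)) : Prop := out = get_rotated_shape_py_alt base_cells rotation
instance (base_cells : List (Int × Int)) (rotation : Int) (out : List (Int × Int)) : Decidable (Spec_get_rotated_shape_py base_cells rotation out) := by unfold Spec_get_rotated_shape_py; infer_instance

-- ===== CLAIM (what is proved, stated in full; the proofs are below) =====
def Claim_equal_get_rotated_shape_py : Prop := ∀ (base_cells : List (Int × Int)) (rotation : Int), Dom_get_rotated_shape_py base_cells rotation → Pre_get_rotated_shape_py base_cells rotation → Spec_get_rotated_shape_py base_cells rotation (get_rotated_shape_py base_cells rotation)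

-- ===== LEMMAS AND PROOFS =====

-- The rotation count is one of 0,1,2,3.
theorem pv_k_bounds (rotation : Int) :
    0 ≤ PySem.Int.floordiv (PySem.Int.mod rotation 360) 90 ∧
    PySem.Int.floordiv (PySem.Int.mod rotation 360) 90 < 4 := by
  have h0 : (0:Int) < 360 := by norm_num
  have hm0 := PySem.Int.mod_nonneg rotation h0
  have hm1 := PySem.Int.mod_lt rotation h0
  constructor
  · rw [PySem.Int.le_floordiv_iff_mul_le (by norm_num)]; omega
  · rw [PySem.Int.floordiv_lt_iff_lt_mul (by norm_num)]; omega

theorem pv_foldl_min_neg (f : (Int × Int) → Int) (t : List (Int × Int)) :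
    ∀ x : Int, List.foldl min (-x) (t.map (fun a => -(f a))) = -(List.foldl max x (t.map f)) := by
  induction t with
  | nil => intro x; simp
  | cons a t ih =>
      intro x
      simp only [List.map_cons, List.foldl_cons]
      rw [show min (-x) (-(f a)) = -(max x (f a)) by omega]
      exact ih (max x (f a))

-- min of the negated projection is the negated max of the projection.
theorem pv_min?_map_neg (l : List (Int × Int)) (f : (Int × Int) → Int) :
    PySem.List.min? (l.map (fun a => -(f a))) (fun x => x)
      = (PySem.List.max? (l.map f) (fun x => x)).map (fun y => -y) := by
  cases l with
  | nil => simp [PySem.List.min?, PySem.List.max?]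
  | cons a t =>
      simp only [List.map_cons, PySem.List.min?_id_cons, PySem.List.max?_id_cons, Option.map_some]
      exact congrArg some (pv_foldl_min_neg f t (f a))

theorem pv_getD_neg (o : Option Int) : (o.map (fun y => -y)).getD 0 = -(o.getD 0) := by
  cases o <;> simp

theorem get_rotated_shape_py_spec_aux (base_cells : List (Int × Int)) (rotation : Int) :
    get_rotated_shape_py base_cells rotation = get_rotated_shape_py_alt base_cells rotation := by
  obtain ⟨h0, h4⟩ := pv_k_bounds rotation
  set k := PySem.Int.floordiv (PySem.Int.mod rotation 360) 90 with hk
  simp only [get_rotated_shape_py, get_rotated_shape_py_alt, ← hk]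
  interval_cases k <;>
  · simp only [PySem.List.pyRange]
    norm_num [show Int.toNat 2 = 2 from rfl, show Int.toNat 3 = 3 from rfl,
      List.range_succ, List.map_map, Function.comp_def,
      show (fun rc : ℤ × ℤ => rc.1) = Prod.fst from rfl,
      show (fun rc : ℤ × ℤ => rc.2) = Prod.snd from rfl,
      pv_min?_map_neg, pv_getD_neg]
    try
      refine List.map_congr_left fun a _ => ?_
      refine Prod.ext ?_ ?_ <;> ring
    try intro a b _; omega

-- ===== VERDICT (by name: the statement is the Claim_ definition above) =====
theorem get_rotated_shape_py_spec : Claim_equal_get_rotated_shape_py := by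
  intro base_cells rotation _ _
  exact get_rotated_shape_py_spec_aux base_cells rotation
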